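-- pv_equiv track=rewrite | github.com/ag502/algorithm | Problem/BOJ_17266_어두운 굴다리/main.py | can_install
-- ===== SOURCE A (Python) =====
-- def can_install(street_lamp_positions, length_of_bridge, height):
--     cur_light = 0
--     for street_lamp_position in street_lamp_positions:
--         if street_lamp_position - height <= cur_light:
--             cur_light += street_lamp_position + height
--         else:
--             return False
--     if cur_light < length_of_bridge:
--         return False
--     return True
-- ===== SOURCE B (Python) =====
-- def can_install(street_lamp_positions, length_of_bridge, height):
--     # Backward pass: compute the minimal initial light level that would make
--     # every lamp reachable and the bridge fully lit, then compare with 0.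
--     required = length_of_bridge
--     for p in reversed(street_lamp_positions):
--         required = max(p - height, required - (p + height))
--     return required <= 0
-- ===== Notes on version B (the rewrite author's own statement) =====
-- stated objective: alternative
-- what changed: Replaces A's forward simulation of the accumulated light with early return by a backward pass that folds the lamps right-to-left into the minimal required initial light level (required = max(p-h, required-(p+h)), seeded with the bridge length) and returns required <= 0.
import Mathlib
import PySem

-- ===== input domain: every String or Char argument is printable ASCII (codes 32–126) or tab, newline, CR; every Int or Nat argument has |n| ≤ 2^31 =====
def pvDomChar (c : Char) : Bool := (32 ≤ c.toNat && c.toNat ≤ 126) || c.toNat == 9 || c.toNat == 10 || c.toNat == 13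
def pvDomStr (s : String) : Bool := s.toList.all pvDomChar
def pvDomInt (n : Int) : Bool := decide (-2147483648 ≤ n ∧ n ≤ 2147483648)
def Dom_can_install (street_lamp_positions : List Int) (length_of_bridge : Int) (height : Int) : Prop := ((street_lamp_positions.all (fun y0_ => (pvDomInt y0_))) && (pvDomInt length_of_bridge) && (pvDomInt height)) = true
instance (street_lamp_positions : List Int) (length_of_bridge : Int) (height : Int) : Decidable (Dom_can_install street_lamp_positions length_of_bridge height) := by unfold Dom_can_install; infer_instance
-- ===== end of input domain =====

-- B replaces A's forward light simulation by a backward fold computing the minimal required initial light (alternative algorithm, same cost).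


-- ===== PORT A =====
-- the for-loop with its early `return False`: none = early False return, some cur = loop finished
def can_install_go (height : Int) (cur : Int) : List Int → Option Int
  | [] => some cur
  | p :: rest => if p - height ≤ cur then can_install_go height (cur + (p + height)) rest else none

def can_install (street_lamp_positions : List Int) (length_of_bridge : Int) (height : Int) : Bool :=
  match can_install_go height 0 street_lamp_positions with
  | none => false
  | some cur_light => if cur_light < length_of_bridge then false else true

-- ===== PORT B =====
-- backward pass over reversed(street_lamp_positions), accumulating the minimal required initial light
def can_install_alt (street_lamp_positions : List Int) (length_of_bridge : Int) (height : Int) : Bool :=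
  let required := street_lamp_positions.reverse.foldl
    (fun required p => max (p - height) (required - (p + height))) length_of_bridge
  decide (required ≤ 0)

-- ===== PRECONDITION & SPEC =====
def Spec_can_install (street_lamp_positions : List Int) (length_of_bridge : Int) (height : Int) (out : Bool) : Prop := out = can_install_alt street_lamp_positions length_of_bridge height
instance (street_lamp_positions : List Int) (length_of_bridge : Int) (height : Int) (out : Bool) : Decidable (Spec_can_install street_lamp_positions length_of_bridge height out) := by unfold Spec_can_install; infer_instance

-- ===== CLAIM (what is proved, stated in full; the proofs are below) =====
def Claim_equal_can_install : Prop := ∀ (street_lamp_positions : List Int) (length_of_bridge : Int) (height : Int), Dom_can_install street_lamp_positions length_of_bridge height → Spec_can_install street_lamp_positions length_of_bridge height (can_install street_lamp_positions length_of_bridge height)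

-- ===== LEMMAS AND PROOFS =====

-- proof-only right-fold form of B's backward pass
def pvReq (height len : Int) : List Int → Int
  | [] => len
  | p :: rest => max (p - height) (pvReq height len rest - (p + height))

theorem pvReq_eq_fold (height len : Int) (ps : List Int) :
    ps.reverse.foldl (fun required p => max (p - height) (required - (p + height))) len
      = pvReq height len ps := by
  induction ps generalizing len with
  | nil => simp [pvReq]
  | cons p rest ih =>
    simp only [List.reverse_cons, List.foldl_append, List.foldl_cons, List.foldl_nil, pvReq]
    rw [ih]

theorem pvMain (height len : Int) (ps : List Int) (cur : Int) :
    (match can_install_go height cur ps with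
      | none => false
      | some c => if c < len then false else true) = decide (pvReq height len ps ≤ cur) := by
  induction ps generalizing cur with
  | nil =>
    by_cases h : cur < len <;> simp [can_install_go, pvReq, h] <;> omega
  | cons p rest ih =>
    by_cases h : p - height ≤ cur
    · have step : can_install_go height cur (p :: rest)
          = can_install_go height (cur + (p + height)) rest := by
        simp [can_install_go, h]
      rw [step, ih]
      have : (pvReq height len (p :: rest) ≤ cur) ↔ (pvReq height len rest ≤ cur + (p + height)) := by
        simp only [pvReq]; omega
      simp [this]
    · have step : can_install_go height cur (p :: rest) = none := by
        simp [can_install_go, h]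
      rw [step]
      have : ¬ (pvReq height len (p :: rest) ≤ cur) := by
        simp only [pvReq]; omega
      simp [this]

-- ===== VERDICT (by name: the statement is the Claim_ definition above) =====
theorem can_install_spec : Claim_equal_can_install := by
  intro ps len h _
  show can_install ps len h = can_install_alt ps len h
  simp only [can_install, can_install_alt]
  rw [pvReq_eq_fold]
  exact pvMain h len ps 0
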